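-- pv_equiv track=rewrite | github.com/cresd1601/Python-Training | python/basic/x.practices/practice_2_4.py | categorize_unknown_words
-- ===== SOURCE A (Python) =====
-- def categorize_unknown_words(unknown_words, word_list):
--     """Categorize unknown words into typos, common words, and obscure words."""
--     typos = set()
--     common_words = set()
--     obscure_words = set()
--
--     for word in unknown_words:
--         if len(word) <= 2 and word not in word_list:  # Only add short words to typos if not in word list
--             typos.add(word)
--         elif word in word_list:  # Classify as common if it's in the word list
--             common_words.add(word)
--         else:
--             obscure_words.add(word)
--
--     return typos, common_words, obscure_words
-- ===== SOURCE B (Python) =====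
-- def categorize_unknown_words(unknown_words, word_list):
--     """Categorize unknown words into typos, common words, and obscure words."""
--     unknown = set(unknown_words)
--     common = {w for w in unknown if w in word_list}
--     rest = unknown - common
--     typos = {w for w in rest if len(w) <= 2}
--     obscure = rest - typos
--     return typos, common, obscure
-- ===== Notes on version B (the rewrite author's own statement) =====
-- stated objective: alternative
-- what changed: Replaces A's single three-way branching loop with set algebra: dedupe once, select common words by membership, then split the remainder into typos and obscure via a length filter and set differences.
import Mathlib
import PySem

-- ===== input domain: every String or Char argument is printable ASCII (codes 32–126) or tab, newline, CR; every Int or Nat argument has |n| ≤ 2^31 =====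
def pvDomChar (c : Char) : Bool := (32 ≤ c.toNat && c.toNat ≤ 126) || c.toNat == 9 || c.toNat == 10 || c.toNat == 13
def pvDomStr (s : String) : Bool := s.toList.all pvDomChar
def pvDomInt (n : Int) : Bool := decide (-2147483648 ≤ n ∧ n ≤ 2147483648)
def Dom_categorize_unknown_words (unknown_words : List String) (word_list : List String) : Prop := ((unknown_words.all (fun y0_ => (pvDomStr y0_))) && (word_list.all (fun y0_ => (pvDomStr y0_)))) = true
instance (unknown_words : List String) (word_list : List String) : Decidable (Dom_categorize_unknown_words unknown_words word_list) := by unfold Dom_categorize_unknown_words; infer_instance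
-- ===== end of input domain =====

-- B replaces A's single three-way branching loop with set algebra (dedupe, membership filter, set differences); alternative decomposition, same cost.


-- ===== PORT A =====
-- one iteration of A's loop over the triple (typos, common_words, obscure_words)
def catAStep (word_list : List String) (st : List String × List String × List String) (word : String) : List String × List String × List String :=
  if PySem.Str.len word ≤ 2 ∧ word_list.contains word = false then
    (PySem.Set.add st.1 word, st.2.1, st.2.2)
  else if word_list.contains word = true then
    (st.1, PySem.Set.add st.2.1 word, st.2.2)
  else
    (st.1, st.2.1, PySem.Set.add st.2.2 word)

def categorize_unknown_words (unknown_words : List String) (word_list : List String) : List String × List String × List String :=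
  unknown_words.foldl (catAStep word_list) ([], [], [])

-- ===== PORT B =====
def categorize_unknown_words_alt (unknown_words : List String) (word_list : List String) : List String × List String × List String :=
  let unknown : PySem.Set String := PySem.Set.ofList unknown_words
  let common : PySem.Set String := PySem.Set.ofList (unknown.filter (fun w => word_list.contains w))
  let rest : PySem.Set String := PySem.Set.diff unknown common
  let typos : PySem.Set String := PySem.Set.ofList (rest.filter (fun w => decide (PySem.Str.len w ≤ 2)))
  let obscure : PySem.Set String := PySem.Set.diff rest typos
  (typos, common, obscure)

-- ===== PRECONDITION & SPEC =====
def Spec_categorize_unknown_words (unknown_words : List String) (word_list : List String) (out : List String × List String × List String) : Prop := out = categorize_unknown_words_alt unknown_words word_list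
instance (unknown_words : List String) (word_list : List String) (out : List String × List String × List String) : Decidable (Spec_categorize_unknown_words unknown_words word_list out) := by unfold Spec_categorize_unknown_words; infer_instance

-- ===== CLAIM (what is proved, stated in full; the proofs are below) =====
def Claim_equal_categorize_unknown_words : Prop := ∀ (unknown_words : List String) (word_list : List String), Dom_categorize_unknown_words unknown_words word_list → Spec_categorize_unknown_words unknown_words word_list (categorize_unknown_words unknown_words word_list)



-- ===== LEMMAS AND PROOFS =====

-- branch predicates of A, as Bools
def pTypo (wl : List String) (w : String) : Bool := decide (PySem.Str.len w  ≤  2) && !wl.contains w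
def pCommon (wl : List String) (w : String) : Bool := wl.contains w
def pObscure (wl : List String) (w : String) : Bool := !decide (PySem.Str.len w  ≤  2) && !wl.contains w

-- a conditional-add fold is a fold over the filtered list
theorem foldl_condAdd (p : String -> Bool) (l : List String) (s : PySem.Set String) :
    l.foldl (fun s w => if p w then PySem.Set.add s w else s) s
      = (l.filter p).foldl PySem.Set.add s := by
  induction l generalizing s with
  | nil => rfl
  | cons x xs ih =>
    simp only [List.foldl_cons, List.filter_cons]
    cases h : p x
    · simp [ih]
    · simp [ih]

-- A's fold splits into three independent conditional-add folds
theorem foldA_split (wl : List String) (l : List String)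
    (t c o : PySem.Set String) :
    l.foldl (catAStep wl) (t, c, o)
      = (l.foldl (fun s w => if pTypo wl w then PySem.Set.add s w else s) t,
         l.foldl (fun s w => if pCommon wl w then PySem.Set.add s w else s) c,
         l.foldl (fun s w => if pObscure wl w then PySem.Set.add s w else s) o) := by
  induction l generalizing t c o with
  | nil => rfl
  | cons x xs ih =>
    simp only [List.foldl_cons]
    by_cases h1 : PySem.Str.len x  ≤  2 ∧ wl.contains x = false
    · have ht : pTypo wl x = true := by
        unfold pTypo; rw [decide_eq_true h1.1, h1.2]; rfl
      have hc : pCommon wl x = false := h1.2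
      have ho : pObscure wl x = false := by
        unfold pObscure; rw [decide_eq_true h1.1]; rfl
      simp only [catAStep, if_pos h1, ht, hc, ho, if_true, Bool.false_eq_true, if_false, ih]
    · by_cases h2 : wl.contains x = true
      · have ht : pTypo wl x = false := by unfold pTypo; rw [h2]; simp
        have hc : pCommon wl x = true := h2
        have ho : pObscure wl x = false := by unfold pObscure; rw [h2]; simp
        simp only [catAStep, if_neg h1, if_pos h2, ht, hc, ho, if_true, Bool.false_eq_true, if_false, ih]
      · have hcf : wl.contains x = false := by
          cases h : wl.contains x
          · rfl
          · exact absurd h h2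
        have hlen : ¬ PySem.Str.len x  ≤  2 := fun hl => h1 (And.intro hl hcf)
        have ht : pTypo wl x = false := by
          unfold pTypo; rw [decide_eq_false hlen]; rfl
        have hc : pCommon wl x = false := hcf
        have ho : pObscure wl x = true := by
          unfold pObscure; rw [decide_eq_false hlen, hcf]; rfl
        simp only [catAStep, if_neg h1, if_neg h2, ht, hc, ho, if_true, Bool.false_eq_true, if_false, ih]

-- filtering a Set.add
theorem filter_setAdd (p : String → Bool) (s : PySem.Set String) (x : String) :
    (PySem.Set.add s x).filter p
      = if p x then PySem.Set.add (s.filter p) x else s.filter p := by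
  unfold PySem.Set.add
  by_cases hm : x ∈ s
  · cases hp : p x
    · simp [hm]
    · have hmm : x ∈ s.filter p := List.mem_filter.mpr (And.intro hm hp)
      simp [hm, hmm]
  · cases hp : p x
    · simp [hm, hp, List.filter_append]
    · have hnm : x ∉ s.filter p := fun h => hm (List.mem_filter.mp h).1
      simp [hm, hp, hnm, List.filter_append]

-- filter commutes with a fold of Set.add
theorem filter_foldl_add (p : String -> Bool) (l : List String) (s : PySem.Set String) :
    (l.foldl PySem.Set.add s).filter p = (l.filter p).foldl PySem.Set.add (s.filter p) := by
  induction l generalizing s with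
  | nil => rfl
  | cons x xs ih =>
    simp only [List.foldl_cons, List.filter_cons]
    rw [ih, filter_setAdd]
    cases h : p x
    · simp
    · simp

-- filter commutes with ofList
theorem filter_ofList (p : String -> Bool) (l : List String) :
    (PySem.Set.ofList l).filter p = PySem.Set.ofList (l.filter p) := by
  rw [PySem.Set.ofList_eq_foldl, filter_foldl_add, PySem.Set.ofList_eq_foldl]
  rfl

-- a conditional-add fold from the empty set is ofList of the filtered list
theorem condAdd_eq_ofList (p : String -> Bool) (l : List String) :
    l.foldl (fun s w => if p w then PySem.Set.add s w else s) []
      = PySem.Set.ofList (l.filter p) := by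
  rw [foldl_condAdd, PySem.Set.ofList_eq_foldl]

theorem contains_eq_false_of_not_mem {s : PySem.Set String} {x : String}
    (h : x ∉ s) : PySem.Set.contains s x = false := by
  cases hc : PySem.Set.contains s x
  · rfl
  · exact absurd ((PySem.Set.contains_iff s x).mp hc) h

-- ===== VERDICT (by name: the statement is the Claim_ definition above) =====
theorem categorize_unknown_words_spec : Claim_equal_categorize_unknown_words := by
  intro uw wl _
  show categorize_unknown_words uw wl = categorize_unknown_words_alt uw wl
  have hNodup : (PySem.Set.ofList uw).Nodup := PySem.Set.nodup_ofList uw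
  -- B's common set collapses to a filter of the deduped input
  have hC : PySem.Set.ofList ((PySem.Set.ofList uw).filter (fun w => wl.contains w))
      = (PySem.Set.ofList uw).filter (pCommon wl) :=
    PySem.Set.ofList_eq_self_of_nodup _ (hNodup.filter _)
  -- B's rest set is the not-in-word_list filter of the deduped input
  have hR : PySem.Set.diff (PySem.Set.ofList uw)
        ((PySem.Set.ofList uw).filter (pCommon wl))
      = (PySem.Set.ofList uw).filter (fun w => !wl.contains w) := by
    unfold PySem.Set.diff
    apply List.filter_congr
    intro x hx
    by_cases hm : wl.contains x = true
    · have hct : PySem.Set.contains ((PySem.Set.ofList uw).filter (pCommon wl)) x = true :=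
        (PySem.Set.contains_iff _ x).mpr (List.mem_filter.mpr (And.intro hx hm))
      rw [hct, hm]
    · have hmf : wl.contains x = false := by
        cases h : wl.contains x
        · rfl
        · exact absurd h hm
      have hcx : PySem.Set.contains ((PySem.Set.ofList uw).filter (pCommon wl)) x = false := by
        apply contains_eq_false_of_not_mem
        intro hmem
        have hq := (List.mem_filter.mp hmem).2
        rw [pCommon, hmf] at hq
        exact Bool.false_ne_true hq
      rw [hcx, hmf]
  have hRnodup : ((PySem.Set.ofList uw).filter (fun w => !wl.contains w)).Nodup :=
    hNodup.filter _
  -- B's typos set is the A typo-predicate filter of the deduped input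
  have hT : PySem.Set.ofList
        (((PySem.Set.ofList uw).filter (fun w => !wl.contains w)).filter
          (fun w => decide (PySem.Str.len w  ≤  2)))
      = (PySem.Set.ofList uw).filter (pTypo wl) := by
    rw [PySem.Set.ofList_eq_self_of_nodup _ (hRnodup.filter _), List.filter_filter]
    rfl
  -- B's obscure set is the A obscure-predicate filter of the deduped input
  have hO : PySem.Set.diff ((PySem.Set.ofList uw).filter (fun w => !wl.contains w))
        ((PySem.Set.ofList uw).filter (pTypo wl))
      = (PySem.Set.ofList uw).filter (pObscure wl) := by
    unfold PySem.Set.diff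
    rw [List.filter_filter]
    apply List.filter_congr
    intro x hx
    by_cases hs : PySem.Str.len x  ≤  2
    · by_cases hw : wl.contains x = true
      · rw [hw]; unfold pObscure; rw [hw]; simp
      · have hwf : wl.contains x = false := by
          cases h : wl.contains x
          · rfl
          · exact absurd h hw
        have hmem : PySem.Set.contains ((PySem.Set.ofList uw).filter (pTypo wl)) x = true := by
          refine (PySem.Set.contains_iff _ x).mpr (List.mem_filter.mpr (And.intro hx ?_))
          unfold pTypo; rw [decide_eq_true hs, hwf]; rfl
        rw [hmem]
        unfold pObscure; rw [decide_eq_true hs]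
    · have hnm : PySem.Set.contains ((PySem.Set.ofList uw).filter (pTypo wl)) x = false := by
        apply contains_eq_false_of_not_mem
        intro hmem
        have hq := (List.mem_filter.mp hmem).2
        rw [pTypo, decide_eq_false hs] at hq
        simp at hq
      rw [hnm]
      unfold pObscure; rw [decide_eq_false hs]
  -- assemble
  simp only [categorize_unknown_words, categorize_unknown_words_alt]
  rw [foldA_split, condAdd_eq_ofList, condAdd_eq_ofList, condAdd_eq_ofList,
      ← filter_ofList (pTypo wl) uw, ← filter_ofList (pCommon wl) uw,
      ← filter_ofList (pObscure wl) uw, hC, hR, hT, hO]
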